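-- pv_equiv track=rewrite | github.com/Likelion-Algorithm/AlgoStudy | 힙/더 맵게/주현.py | solution
-- ===== SOURCE A (Python) =====
-- import heapq
--
-- def solution(scoville, k):
--     answer = 0
--     heapq.heapify(scoville)
--     while 1:
--         if len(scoville)==1:
--             return -1
--         a= heapq.heappop(scoville)
--         b= heapq.heappop(scoville)
--         heapq.heappush(scoville, a+2*b)
--         answer += 1
--         c= heapq.heappop(scoville)
--         if c>=k:
--             return answer
--         else:
--             heapq.heappush(scoville, c)
--             continue
-- ===== SOURCE B (Python) =====
-- def solution(scoville, k):
--     # Two-stream merge: with nonnegative Scoville scores, each mixed value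
--     # a + 2*b is >= every mixed value still pending, so the mixed results form
--     # a nondecreasing stream by themselves.  Sort the input once and consume
--     # both streams through head indices -- no priority queue is ever maintained.
--     scoville.sort()
--     mixed = []
--     i = 0  # head of the sorted original stream
--     j = 0  # head of the mixed-results stream
--     answer = 0
--     while True:
--         if (len(scoville) - i) + (len(mixed) - j) == 1:
--             return -1
--         vals = []
--         for _ in range(2):
--             if j < len(mixed) and (i >= len(scoville) or mixed[j] < scoville[i]):
--                 vals.append(mixed[j])
--                 j += 1
--             else:
--                 vals.append(scoville[i])
--                 i += 1
--         mixed.append(vals[0] + 2 * vals[1])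
--         answer += 1
--         if j < len(mixed) and (i >= len(scoville) or mixed[j] < scoville[i]):
--             front = mixed[j]
--         else:
--             front = scoville[i]
--         if front >= k:
--             return answer
-- ===== Notes on version B (the rewrite author's own statement) =====
-- stated objective: alternative
-- what changed: Replaces the priority queue entirely by a two-stream merge: sort the input once, then consume the sorted originals and the mixed results as two head-indexed streams, exploiting that each new mix is never smaller than any still-pending mix, so no heap or sorted reinsertion is ever performed.
import Mathlib
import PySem

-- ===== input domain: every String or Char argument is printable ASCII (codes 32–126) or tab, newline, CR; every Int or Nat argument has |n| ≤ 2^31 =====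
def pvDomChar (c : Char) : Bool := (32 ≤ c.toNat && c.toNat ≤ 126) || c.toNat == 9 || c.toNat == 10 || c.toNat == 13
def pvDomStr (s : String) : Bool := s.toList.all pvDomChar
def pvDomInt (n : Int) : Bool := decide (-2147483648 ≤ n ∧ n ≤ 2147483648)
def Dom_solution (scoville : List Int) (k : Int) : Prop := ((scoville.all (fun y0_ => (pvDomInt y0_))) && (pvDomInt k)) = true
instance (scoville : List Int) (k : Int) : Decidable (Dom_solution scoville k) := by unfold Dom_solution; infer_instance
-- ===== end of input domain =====

-- B replaces A's binary heap by a two-stream merge: sort once, then consume the sorted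
-- originals and the appended mix results through two head indices (no priority queue).
-- Both Pythons mutate the argument list in place (A leaves a consumed heap, B a sorted
-- list); the equivalence proved here is about the RETURN value only.


-- ===== PORT A =====
-- heapq calls are ported by their CONTRACT (exact for Int elements, where only the popped
-- values matter): heapq.heappop removes and returns the smallest element (none left = the
-- IndexError Pre_ excludes), heapq.heappush adds the element (its position in our model is
-- immaterial), heapq.heapify only reorders in place (multiset unchanged; a no-op here).
def pyHeappop (h : List Int) : Int × List Int :=
  match PySem.List.min? h (fun x => x) with
  | some m => (m, (PySem.List.remove? h m).getD h)
  | none => (0, h)   -- empty heap: Python raises IndexError; excluded by Pre_solution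

-- the 'while 1' loop of A; fuel = initial length bounds the iterations (each one shrinks the heap)
def solutionGoA (k : Int) : Nat → List Int → Int → Int
  | 0, _, _ => -1   -- unreachable under Pre_solution
  | n + 1, scov, answer =>
    if scov.length = 1 then -1
    else
      let p1 := pyHeappop scov
      let p2 := pyHeappop p1.2
      let s3 := (p1.1 + 2 * p2.1) :: p2.2           -- heappush(scoville, a+2*b)
      let answer' := answer + 1
      let p4 := pyHeappop s3
      if p4.1 ≥ k then answer' else solutionGoA k n (p4.1 :: p4.2) answer'   -- heappush(scoville, c)

def solution (scoville : List Int) (k : Int) : Int :=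
  solutionGoA k scoville.length scoville 0

-- ===== PORT B =====
-- B's front-of-two-streams step: the conditional 'if j < len(mixed) and (i >= len(scoville)
-- or mixed[j] < scoville[i])' of Source B; index accesses are modelled by getD, in range under
-- Pre_solution wherever the branch reads them.  The same conditional occurs three times in
-- Source B (twice in the vals loop, once for front); popB is its transcription, the front read
-- uses only its value component.
def popB (base mixed : List Int) (i j : Nat) : Int × Nat × Nat :=
  if j < mixed.length ∧ (base.length ≤ i ∨ mixed.getD j 0 < base.getD i 0) then
    (mixed.getD j 0, i, j + 1)
  else
    (base.getD i 0, i + 1, j)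

-- the 'while True' loop of Source B over state (i, j, mixed); fuel = initial length
def solutionGoB (base : List Int) (k : Int) : Nat → Nat → Nat → List Int → Int → Int
  | 0, _, _, _, _ => -1   -- unreachable under Pre_solution
  | n + 1, i, j, mixed, answer =>
    if (base.length - i) + (mixed.length - j) = 1 then -1
    else
      let p1 := popB base mixed i j                      -- first iteration of the vals loop
      let p2 := popB base mixed p1.2.1 p1.2.2            -- second iteration
      let mixed' := mixed ++ [p1.1 + 2 * p2.1]           -- mixed.append(vals[0] + 2*vals[1])
      let answer' := answer + 1
      let f := (popB base mixed' p2.2.1 p2.2.2).1        -- 'front': same conditional, value only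
      if f ≥ k then answer' else solutionGoB base k n p2.2.1 p2.2.2 mixed' answer'

def solution_alt (scoville : List Int) (k : Int) : Int :=
  let s := PySem.List.sorted scoville (fun x => x) false   -- scoville.sort()
  solutionGoB s k s.length 0 0 [] 0

-- ===== PRECONDITION & SPEC =====
-- Pre_ excludes only the empty list, on which both Pythons raise IndexError.
def Pre_solution (scoville : List Int) (k : Int) : Prop := scoville ≠ []
instance (scoville : List Int) (k : Int) : Decidable (Pre_solution scoville k) := by unfold Pre_solution; infer_instance
def pvWitness_solution : List Int × Int := ([1, 2, 3, 9, 10, 12], 7)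

def Spec_solution (scoville : List Int) (k : Int) (out : Int) : Prop := out = solution_alt scoville k
instance (scoville : List Int) (k : Int) (out : Int) : Decidable (Spec_solution scoville k out) := by unfold Spec_solution; infer_instance

-- ===== CLAIM (what is proved, stated in full; the proofs are below) =====
def Claim_equal_solution : Prop := ∀ (scoville : List Int) (k : Int), Dom_solution scoville k → Pre_solution scoville k → Spec_solution scoville k (solution scoville k)

-- ===== LEMMAS AND PROOFS =====

theorem drop_sublist_of_le {l : List Int} {i i' : Nat} (h : i ≤ i') :
    List.Sublist (l.drop i') (l.drop i) := by
  have he : l.drop i' = (l.drop i).drop (i' - i) := by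
    rw [List.drop_drop]; congr 1; omega
  rw [he]; exact List.drop_sublist _ _

theorem mem_drop_of_le {l : List Int} {i i' : Nat} (h : i ≤ i') {x : Int}
    (hx : x ∈ l.drop i') : x ∈ l.drop i :=
  (drop_sublist_of_le h).mem hx

-- popping a heap that is a permutation of m :: rest, m minimal, yields m and a permutation of rest
theorem pyHeappop_of_perm (h : List Int) (m : Int) (rest : List Int)
    (hp : h.Perm (m :: rest)) (hmin : ∀ y ∈ m :: rest, m ≤ y) :
    (pyHeappop h).1 = m ∧ (pyHeappop h).2.Perm rest := by
  have hane : m ∈ h := hp.mem_iff.2 (by simp)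
  obtain ⟨m', hm'⟩ : ∃ m', PySem.List.min? h (fun x => x) = some m' := by
    cases hmm : PySem.List.min? h (fun x => x) with
    | none =>
      have : h = [] := (PySem.List.min?_eq_none_iff h (fun x => x)).1 hmm
      subst this; simp at hane
    | some m' => exact ⟨m', rfl⟩
  have hmem : m' ∈ h := PySem.List.min?_mem hm'
  have hmin' : ∀ y ∈ h, m' ≤ y := fun y hy => PySem.List.min?_isMin hm' y hy
  have hmm : m' = m := by
    have h1 : m' ≤ m := hmin' m hane
    have h2 : m ≤ m' := hmin m' (hp.mem_iff.1 hmem)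
    omega
  subst hmm
  have hrem : PySem.List.remove? h m' = some (h.erase m') :=
    PySem.List.remove?_eq_some_erase h m' hmem
  refine ⟨by simp [pyHeappop, hm'], ?_⟩
  simp only [pyHeappop, hm', hrem, Option.getD_some]
  have := hp.erase m'
  simpa using this

-- what one step of B's two-stream pop does: it removes and returns the minimum of the
-- remaining elements (front of two sorted streams), moving one head index forward
theorem popB_spec (base mixed : List Int) (i j : Nat)
    (hj : j ≤ mixed.length)
    (hb : (base.drop i).Pairwise (· ≤ ·))
    (hm : (mixed.drop j).Pairwise (· ≤ ·))
    (hP2 : ∀ x ∈ mixed.drop j, ∀ y ∈ base.drop i, x ≤ 3 * y)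
    (hP3 : (mixed.drop j).Pairwise (fun x y => x ≤ 3 * y ∧ y ≤ 3 * x))
    (hne : base.drop i ++ mixed.drop j ≠ []) :
    (base.drop i ++ mixed.drop j).Perm
        ((popB base mixed i j).1 :: (base.drop (popB base mixed i j).2.1 ++ mixed.drop (popB base mixed i j).2.2)) ∧
    (∀ y ∈ base.drop i ++ mixed.drop j, (popB base mixed i j).1 ≤ y) ∧
    i ≤ (popB base mixed i j).2.1 ∧
    j ≤ (popB base mixed i j).2.2 ∧
    (popB base mixed i j).2.2 ≤ mixed.length ∧
    (∀ x ∈ mixed.drop (popB base mixed i j).2.2, x ≤ 3 * (popB base mixed i j).1) := by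
  by_cases hc : j < mixed.length ∧ (base.length ≤ i ∨ mixed.getD j 0 < base.getD i 0)
  · obtain ⟨hjlt, hor⟩ := hc
    have hdj : mixed.drop j = mixed.getD j 0 :: mixed.drop (j + 1) := by
      rw [List.getD_eq_getElem _ _ hjlt, List.drop_eq_getElem_cons hjlt]
    have hpopB : popB base mixed i j = (mixed.getD j 0, i, j + 1) := by
      simp only [popB, if_pos (And.intro hjlt hor)]
    rw [hpopB]
    refine ⟨?_, ?_, le_refl _, (show j ≤ j + 1 by omega), (show j + 1 ≤ mixed.length by omega), ?_⟩
    · rw [hdj]; exact List.perm_middle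
    · intro y hy
      rcases List.mem_append.1 hy with hyb | hym
      · -- y comes from the base stream: the condition says the mixed front is smaller
        have hi : i < base.length := by
          by_contra hge
          rw [List.drop_eq_nil_of_le (by omega)] at hyb; simp at hyb
        have hdi : base.drop i = base.getD i 0 :: base.drop (i + 1) := by
          rw [List.getD_eq_getElem _ _ hi, List.drop_eq_getElem_cons hi]
        have hlt : mixed.getD j 0 < base.getD i 0 := by
          rcases hor with h' | h'
          · exact absurd h' (by omega)
          · exact h'
        have hby : base.getD i 0 ≤ y := by
          rw [hdi] at hyb hb
          rcases List.mem_cons.1 hyb with rfl | hmem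
          · exact le_refl _
          · exact (List.pairwise_cons.1 hb).1 y hmem
        omega
      · rw [hdj] at hym hm
        rcases List.mem_cons.1 hym with rfl | hmem
        · exact le_refl _
        · exact (List.pairwise_cons.1 hm).1 y hmem
    · intro x hx
      rw [hdj] at hP3
      exact ((List.pairwise_cons.1 hP3).1 x hx).2
  · have hpopB : popB base mixed i j = (base.getD i 0, i + 1, j) := by
      simp only [popB, if_neg hc]
    have hi : i < base.length := by
      by_contra hge
      have hbnil : base.drop i = [] := List.drop_eq_nil_of_le (by omega)
      have hmne : mixed.drop j ≠ [] := by
        intro h0; rw [hbnil, h0] at hne; exact hne rfl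
      have hjlt : j < mixed.length := by
        by_contra hge2
        exact hmne (List.drop_eq_nil_of_le (by omega))
      exact hc ⟨hjlt, Or.inl (by omega)⟩
    have hdi : base.drop i = base.getD i 0 :: base.drop (i + 1) := by
      rw [List.getD_eq_getElem _ _ hi, List.drop_eq_getElem_cons hi]
    rw [hpopB]
    refine ⟨?_, ?_, (show i ≤ i + 1 by omega), le_refl _, hj, ?_⟩
    · rw [hdi]; simp
    · intro y hy
      rcases List.mem_append.1 hy with hyb | hym
      · rw [hdi] at hyb hb
        rcases List.mem_cons.1 hyb with rfl | hmem
        · exact le_refl _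
        · exact (List.pairwise_cons.1 hb).1 y hmem
      · -- y comes from the pending mixed stream: the condition failed, so base front ≤ mixed front
        have hjlt : j < mixed.length := by
          by_contra hge2
          rw [List.drop_eq_nil_of_le (by omega)] at hym; simp at hym
        have hle : base.getD i 0 ≤ mixed.getD j 0 := by
          by_contra hlt
          exact hc ⟨hjlt, Or.inr (by omega)⟩
        have hdj : mixed.drop j = mixed.getD j 0 :: mixed.drop (j + 1) := by
          rw [List.getD_eq_getElem _ _ hjlt, List.drop_eq_getElem_cons hjlt]
        rw [hdj] at hym hm
        rcases List.mem_cons.1 hym with rfl | hmem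
        · exact hle
        · exact le_trans hle ((List.pairwise_cons.1 hm).1 y hmem)
    · intro x hx
      have : base.getD i 0 ∈ base.drop i := by rw [hdi]; simp
      exact hP2 x hx _ this

-- the two loops agree: A's heap state is a permutation of B's two-stream state
-- B's invariants: both stream suffixes sorted; every pending mix x satisfies x ≤ 3y for
-- every other remaining element y (hP2 vs the base stream, hP3 among pending mixes) —
-- that is what makes a fresh mix a+2b at least as large as every pending mix.
theorem go_agree (base : List Int) (k : Int) :
    ∀ (n : Nat) (i j : Nat) (mixed h : List Int) (ans : Int),
      h.Perm (base.drop i ++ mixed.drop j) →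
      j ≤ mixed.length →
      (base.drop i).Pairwise (· ≤ ·) →
      (mixed.drop j).Pairwise (· ≤ ·) →
      (∀ x ∈ mixed.drop j, ∀ y ∈ base.drop i, x ≤ 3 * y) →
      (mixed.drop j).Pairwise (fun x y => x ≤ 3 * y ∧ y ≤ 3 * x) →
      base.drop i ++ mixed.drop j ≠ [] →
      solutionGoA k n h ans = solutionGoB base k n i j mixed ans := by
  intro n
  induction n with
  | zero => intro i j mixed h ans _ _ _ _ _ _ _; rfl
  | succ n ih =>
    intro i j mixed h ans hp hj hb hm hP2 hP3 hne
    have hlen : h.length = (base.drop i ++ mixed.drop j).length := hp.length_eq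
    have lenC : (base.drop i ++ mixed.drop j).length = (base.length - i) + (mixed.length - j) := by
      simp [List.length_append]
    by_cases h1 : (base.length - i) + (mixed.length - j) = 1
    · have hA1 : h.length = 1 := by omega
      simp [solutionGoA, solutionGoB, hA1, h1]
    · have hCne : (base.drop i ++ mixed.drop j).length ≥ 1 := by
        cases hcc : (base.drop i ++ mixed.drop j) with
        | nil => exact absurd hcc hne
        | cons z zs => simp only [List.length_cons]; omega
      have hC2 : (base.drop i ++ mixed.drop j).length ≥ 2 := by omega
      have hA1 : ¬ h.length = 1 := by omega
      -- first pop
      obtain ⟨perm1, min1, hi1, hj1, hj1le, surv1⟩ := popB_spec base mixed i j hj hb hm hP2 hP3 hne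
      set a := (popB base mixed i j).1 with ha_def
      set i1 := (popB base mixed i j).2.1 with hi1_def
      set j1 := (popB base mixed i j).2.2 with hj1_def
      have hmin1' : ∀ y ∈ a :: (base.drop i1 ++ mixed.drop j1), a ≤ y :=
        fun y hy => min1 y (perm1.mem_iff.mpr hy)
      obtain ⟨hA_a, hA_r1⟩ := pyHeappop_of_perm h a (base.drop i1 ++ mixed.drop j1) (hp.trans perm1) hmin1'
      -- invariants at (i1, j1)
      have hb1 : (base.drop i1).Pairwise (· ≤ ·) := hb.sublist (drop_sublist_of_le hi1)
      have hm1 : (mixed.drop j1).Pairwise (· ≤ ·) := hm.sublist (drop_sublist_of_le hj1)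
      have hP2_1 : ∀ x ∈ mixed.drop j1, ∀ y ∈ base.drop i1, x ≤ 3 * y :=
        fun x hx y hy => hP2 x (mem_drop_of_le hj1 hx) y (mem_drop_of_le hi1 hy)
      have hP3_1 : (mixed.drop j1).Pairwise (fun x y => x ≤ 3 * y ∧ y ≤ 3 * x) :=
        hP3.sublist (drop_sublist_of_le hj1)
      have hlen1 : (base.drop i ++ mixed.drop j).length = (base.drop i1 ++ mixed.drop j1).length + 1 := by
        have h' := perm1.length_eq
        simp only [List.length_cons] at h'
        omega
      have hne1 : base.drop i1 ++ mixed.drop j1 ≠ [] := by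
        intro h0
        rw [h0] at hlen1; simp at hlen1; omega
      -- second pop
      obtain ⟨perm2, min2, hi2, hj2, hj2le, surv2⟩ := popB_spec base mixed i1 j1 hj1le hb1 hm1 hP2_1 hP3_1 hne1
      set b := (popB base mixed i1 j1).1 with hb_def
      set i2 := (popB base mixed i1 j1).2.1 with hi2_def
      set j2 := (popB base mixed i1 j1).2.2 with hj2_def
      have hmin2' : ∀ y ∈ b :: (base.drop i2 ++ mixed.drop j2), b ≤ y :=
        fun y hy => min2 y (perm2.mem_iff.mpr hy)
      obtain ⟨hA_b, hA_r2⟩ := pyHeappop_of_perm (pyHeappop h).2 b (base.drop i2 ++ mixed.drop j2) (hA_r1.trans perm2) hmin2'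
      have hab : a ≤ b := hmin1' b (by
        have : b ∈ base.drop i1 ++ mixed.drop j1 := perm2.mem_iff.mpr (by simp)
        simp [this])
      set v := a + 2 * b with hv_def
      set mixed' := mixed ++ [v] with hmixed'_def
      have hdrop' : mixed'.drop j2 = mixed.drop j2 ++ [v] := by
        rw [hmixed'_def, List.drop_append_of_le_length hj2le]
      -- survivor bounds
      have sx3a : ∀ x ∈ mixed.drop j2, x ≤ 3 * a :=
        fun x hx => surv1 x (mem_drop_of_le hj2 hx)
      have sxb : ∀ x ∈ mixed.drop j2, b ≤ x :=
        fun x hx => min2 x (List.mem_append_right _ (mem_drop_of_le hj2 hx))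
      have hbase2b : ∀ y ∈ base.drop i2, b ≤ y :=
        fun y hy => min2 y (List.mem_append_left _ (mem_drop_of_le hi2 hy))
      -- invariants at (i2, j2, mixed')
      have hj' : j2 ≤ mixed'.length := by simp [hmixed'_def]; omega
      have hb2 : (base.drop i2).Pairwise (· ≤ ·) := hb1.sublist (drop_sublist_of_le hi2)
      have hm2 : (mixed.drop j2).Pairwise (· ≤ ·) := hm1.sublist (drop_sublist_of_le hj2)
      have hm' : (mixed'.drop j2).Pairwise (· ≤ ·) := by
        rw [hdrop']
        rw [List.pairwise_append]
        refine ⟨hm2, by simp, ?_⟩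
        intro x hx y hy
        simp at hy; subst hy
        have := sx3a x hx; omega
      have hP2' : ∀ x ∈ mixed'.drop j2, ∀ y ∈ base.drop i2, x ≤ 3 * y := by
        rw [hdrop']
        intro x hx y hy
        rcases List.mem_append.1 hx with hxo | hxv
        · exact hP2 x (mem_drop_of_le (le_trans hj1 hj2) hxo) y
            (mem_drop_of_le (le_trans hi1 hi2) hy)
        · simp at hxv; subst hxv
          have := hbase2b y hy; omega
      have hP3' : (mixed'.drop j2).Pairwise (fun x y => x ≤ 3 * y ∧ y ≤ 3 * x) := by
        rw [hdrop', List.pairwise_append]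
        refine ⟨hP3_1.sublist (drop_sublist_of_le hj2), by simp, ?_⟩
        intro x hx y hy
        simp at hy; subst hy
        have h1 := sx3a x hx
        have h2 := sxb x hx
        constructor <;> omega
      have hneC' : base.drop i2 ++ mixed'.drop j2 ≠ [] := by
        rw [hdrop']; simp
      -- the front check: value component of one more popB step
      obtain ⟨perm3, min3, _, _, _, _⟩ := popB_spec base mixed' i2 j2 hj' hb2 hm' hP2' hP3' hneC'
      set f := (popB base mixed' i2 j2).1 with hf_def
      set i3 := (popB base mixed' i2 j2).2.1 with hi3_def
      set j3 := (popB base mixed' i2 j2).2.2 with hj3_def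
      -- A's third pop sees a permutation of the same multiset
      have hs3perm : (v :: (pyHeappop (pyHeappop h).2).2).Perm (base.drop i2 ++ mixed'.drop j2) := by
        have h1 : (v :: (pyHeappop (pyHeappop h).2).2).Perm (v :: (base.drop i2 ++ mixed.drop j2)) :=
          hA_r2.cons v
        have h2 : (base.drop i2 ++ mixed'.drop j2).Perm (v :: (base.drop i2 ++ mixed.drop j2)) := by
          rw [hdrop', ← List.append_assoc]
          have : (base.drop i2 ++ mixed.drop j2) ++ [v]
              = (base.drop i2 ++ mixed.drop j2) ++ v :: [] := rfl
          rw [this]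
          have hpm := List.perm_middle (a := v) (l₁ := base.drop i2 ++ mixed.drop j2) (l₂ := ([] : List Int))
          simpa using hpm
        exact h1.trans h2.symm
      have hmin3' : ∀ y ∈ f :: (base.drop i3 ++ mixed'.drop j3), f ≤ y :=
        fun y hy => min3 y (perm3.mem_iff.mpr hy)
      obtain ⟨hA_f, hA_r3⟩ := pyHeappop_of_perm (v :: (pyHeappop (pyHeappop h).2).2) f
        (base.drop i3 ++ mixed'.drop j3) (hs3perm.trans perm3) hmin3'
      -- put both loop bodies side by side
      simp only [solutionGoA, solutionGoB, if_neg hA1, if_neg h1]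
      rw [hA_a, hA_b]
      rw [← hv_def, ← hi2_def, ← hj2_def, ← hmixed'_def]
      rw [hA_f, ← hf_def]
      by_cases hfk : f ≥ k
      · simp [hfk]
      · simp only [if_neg hfk]
        exact ih i2 j2 mixed' (f :: (pyHeappop (v :: (pyHeappop (pyHeappop h).2).2)).2) (ans + 1)
          ((hA_r3.cons f).trans perm3.symm) hj' hb2 hm' hP2' hP3' hneC'

-- ===== VERDICT (by name: the statement is the Claim_ definition above) =====
theorem solution_spec : Claim_equal_solution := by
  intro scoville k _ hpre
  unfold Spec_solution solution solution_alt
  have hperm : scoville.Perm (PySem.List.sorted scoville (fun x => x) false) :=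
    (PySem.List.sorted_perm scoville (fun x => x) false).symm
  rw [hperm.length_eq]
  have hsne : PySem.List.sorted scoville (fun x => x) false ≠ [] := by
    simpa [PySem.List.sorted_eq_nil_iff] using hpre
  have := go_agree (PySem.List.sorted scoville (fun x => x) false) k
    (PySem.List.sorted scoville (fun x => x) false).length 0 0 [] scoville 0
    (by simpa using hperm)
    (by simp)
    (by simpa using PySem.List.sorted_pairwise scoville (fun x => x))
    (by simp)
    (by simp)
    (by simp)
    (by simpa using hsne)
  simpa using this
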